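-- pv_equiv track=rewrite | github.com/arosharandew/Alertify | data_collection/weather_api.py | _determine_alert_severity
-- ===== SOURCE A (Python) =====
-- def _determine_alert_severity(event: str) -> str:
--     """Determine severity based on weather event"""
--     event_lower = event.lower()
--
--     high_severity = ['cyclone', 'hurricane', 'tsunami', 'flood warning',
--                      'landslide', 'tornado', 'severe thunderstorm', 'extreme']
--     medium_severity = ['heavy rain', 'thunderstorm', 'lightning',
--                        'strong wind', 'storm', 'warning', 'alert']
--     low_severity = ['rain', 'cloudy', 'fog', 'haze', 'drizzle', 'advisory']
--
--     for keyword in high_severity: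
--         if keyword in event_lower:
--             return 'high'
--
--     for keyword in medium_severity:
--         if keyword in event_lower:
--             return 'medium'
--
--     for keyword in low_severity:
--         if keyword in event_lower:
--             return 'low'
--
--     return 'low'
-- ===== SOURCE B (Python) =====
-- def _determine_alert_severity(event: str) -> str:
--     """Determine severity based on weather event"""
--     levels = [(['cyclone', 'hurricane', 'tsunami', 'flood warning',
--                 'landslide', 'tornado', 'severe thunderstorm', 'extreme'], 3),
--               (['heavy rain', 'thunderstorm', 'lightning',
--                 'strong wind', 'storm', 'warning', 'alert'], 2),
--               (['rain', 'cloudy', 'fog', 'haze', 'drizzle', 'advisory'], 1)]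
--     ranked = [(kw, r) for kws, r in levels for kw in kws]
--
--     event_lower = event.lower()
--     best = 1
--     for kw, r in ranked:
--         if kw in event_lower and r > best:
--             best = r
--     return {3: 'high', 2: 'medium'}.get(best, 'low')
-- ===== Notes on version B (the rewrite author's own statement) =====
-- stated objective: alternative
-- what changed: Replaces three prioritized early-return scans with one flat keyword-to-rank table traversed once while accumulating the maximum matched rank, translated back to a severity label at the end.
import Mathlib
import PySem

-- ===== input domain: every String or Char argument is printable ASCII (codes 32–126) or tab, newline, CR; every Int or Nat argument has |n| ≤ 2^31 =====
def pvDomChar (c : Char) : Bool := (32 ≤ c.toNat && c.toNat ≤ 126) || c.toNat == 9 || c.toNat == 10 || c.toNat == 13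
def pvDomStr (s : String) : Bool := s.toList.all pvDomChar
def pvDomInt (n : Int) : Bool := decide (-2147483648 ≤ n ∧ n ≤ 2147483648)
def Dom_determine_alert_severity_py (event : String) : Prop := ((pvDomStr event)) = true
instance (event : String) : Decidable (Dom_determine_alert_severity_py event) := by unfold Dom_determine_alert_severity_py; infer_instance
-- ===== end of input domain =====

-- B replaces A's three prioritized early-return scans with a single flat keyword→rank
-- table traversed once while accumulating the maximum matched rank (objective: alternative).

-- ===== PORT A =====
def pvHigh : List String := ["cyclone", "hurricane", "tsunami", "flood warning",
  "landslide", "tornado", "severe thunderstorm", "extreme"]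
def pvMed : List String := ["heavy rain", "thunderstorm", "lightning",
  "strong wind", "storm", "warning", "alert"]
def pvLow : List String := ["rain", "cloudy", "fog", "haze", "drizzle", "advisory"]

-- 'for keyword in kws: if keyword in event_lower: return <label>' — an early-return scan is List.any
def determine_alert_severity_py (event : String) : String :=
  let event_lower := PySem.Str.lower event
  if pvHigh.any (fun kw => PySem.Str.isIn kw event_lower) then "high"
  else if pvMed.any (fun kw => PySem.Str.isIn kw event_lower) then "medium"
  else if pvLow.any (fun kw => PySem.Str.isIn kw event_lower) then "low"
  else "low"

-- ===== PORT B =====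
def pvLevels : List (List String × Nat) :=
  [(["cyclone", "hurricane", "tsunami", "flood warning",
     "landslide", "tornado", "severe thunderstorm", "extreme"], 3),
   (["heavy rain", "thunderstorm", "lightning",
     "strong wind", "storm", "warning", "alert"], 2),
   (["rain", "cloudy", "fog", "haze", "drizzle", "advisory"], 1)]

-- [(kw, r) for kws, r in levels for kw in kws]
def pvRanked : List (String × Nat) :=
  pvLevels.flatMap (fun lv => lv.1.map (fun kw => (kw, lv.2)))

-- the loop body: if kw in event_lower and r > best: best = r
def pvStep (event_lower : String) (best : Nat) (p : String × Nat) : Nat :=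
  if PySem.Str.isIn p.1 event_lower && decide (best < p.2) then p.2 else best

def determine_alert_severity_py_alt (event : String) : String :=
  let event_lower := PySem.Str.lower event
  let best := pvRanked.foldl (pvStep event_lower) 1
  if best == 3 then "high" else if best == 2 then "medium" else "low"

-- ===== PRECONDITION & SPEC =====
def Spec_determine_alert_severity_py (event : String) (out : String) : Prop := out = determine_alert_severity_py_alt event
instance (event : String) (out : String) : Decidable (Spec_determine_alert_severity_py event out) := by unfold Spec_determine_alert_severity_py; infer_instance

-- ===== CLAIM (what is proved, stated in full; the proofs are below) =====
def Claim_equal_determine_alert_severity_py : Prop := ∀ (event : String), Dom_determine_alert_severity_py event → Spec_determine_alert_severity_py event (determine_alert_severity_py event)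

-- ===== LEMMAS AND PROOFS =====

-- Folding pvStep over keywords that all carry the same rank r either raises best to r
-- (some keyword matches and best < r) or leaves it unchanged.
theorem pvFold_uniform (e : String) (r : Nat) (kws : List String) (b : Nat) :
    (kws.map (fun k => (k, r))).foldl (pvStep e) b
      = if kws.any (fun kw => PySem.Str.isIn kw e) && decide (b < r) then r else b := by
  induction kws generalizing b with
  | nil => simp
  | cons k kws ih =>
    simp only [List.map_cons, List.foldl_cons, List.any_cons, pvStep]
    by_cases hIn : PySem.Chars.isIn k.toList e.toList = true
    · by_cases hlt : b < r
      · simp [hIn, hlt, ih]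
      · simp [hIn, hlt, ih]
    · simp [hIn, ih]

theorem pvRanked_eq :
    pvRanked = pvHigh.map (fun k => (k, (3 : Nat)))
      ++ (pvMed.map (fun k => (k, (2 : Nat))) ++ pvLow.map (fun k => (k, (1 : Nat)))) := rfl

-- ===== VERDICT (by name: the statement is the Claim_ definition above) =====
set_option maxHeartbeats 1600000 in
theorem determine_alert_severity_py_spec : Claim_equal_determine_alert_severity_py := by
  intro event _
  unfold Spec_determine_alert_severity_py
  simp only [determine_alert_severity_py, determine_alert_severity_py_alt, pvRanked_eq,
    List.foldl_append, pvFold_uniform]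
  simp
  by_cases hH : ∃ x ∈ pvHigh, PySem.Chars.isIn x.toList (PySem.Chars.lower event.toList) = true <;>
  by_cases hM : ∃ x ∈ pvMed, PySem.Chars.isIn x.toList (PySem.Chars.lower event.toList) = true <;>
  by_cases hL : ∃ x ∈ pvLow, PySem.Chars.isIn x.toList (PySem.Chars.lower event.toList) = true <;>
  simp [hH, hM, hL]
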